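-- pv_equiv track=rewrite | github.com/thepeacefulprogrammer/percy | main.py | _get_incremental_text
-- ===== SOURCE A (Python) =====
-- def _get_incremental_text(seen: dict[str, str], key: str, incoming: str | None) -> str:
--     if not incoming:
--         return ""
--
--     previous = seen.get(key, "")
--     if not previous:
--         seen[key] = incoming
--         return incoming
--
--     if incoming.startswith(previous):
--         seen[key] = incoming
--         return incoming[len(previous) :]
--
--     max_overlap = min(len(previous), len(incoming))
--     overlap = 0
--     for size in range(max_overlap, 0, -1):
--         if previous.endswith(incoming[:size]):
--             overlap = size
--             break
--
--     new_text = incoming[overlap:]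
--     seen[key] = previous + new_text
--     return new_text
-- ===== SOURCE B (Python) =====
-- def _get_incremental_text(seen: dict[str, str], key: str, incoming: str | None) -> str:
--     if not incoming:
--         return ""
--
--     previous = seen.get(key, "")
--
--     # Single left-to-right pass over `previous`, maintaining the set of all
--     # lengths j >= 1 such that incoming[:j] is a suffix of the scanned prefix.
--     active: list[int] = []
--     for ch in previous:
--         nxt = [j + 1 for j in active if j < len(incoming) and incoming[j] == ch]
--         if incoming[0] == ch:
--             nxt.append(1)
--         active = nxt
--
--     overlap = max(active, default=0)
--     new_text = incoming[overlap:]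
--     seen[key] = previous + new_text
--     return new_text
-- ===== Notes on version B (the rewrite author's own statement) =====
-- stated objective: alternative
-- what changed: A searches the overlap by trying each candidate size from largest down and slicing/endswith-testing incoming against previous; B makes a single left-to-right pass over previous maintaining the set of active match lengths (all j with incoming[:j] a suffix of the scanned prefix) and takes the maximum at the end.
import Mathlib
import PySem

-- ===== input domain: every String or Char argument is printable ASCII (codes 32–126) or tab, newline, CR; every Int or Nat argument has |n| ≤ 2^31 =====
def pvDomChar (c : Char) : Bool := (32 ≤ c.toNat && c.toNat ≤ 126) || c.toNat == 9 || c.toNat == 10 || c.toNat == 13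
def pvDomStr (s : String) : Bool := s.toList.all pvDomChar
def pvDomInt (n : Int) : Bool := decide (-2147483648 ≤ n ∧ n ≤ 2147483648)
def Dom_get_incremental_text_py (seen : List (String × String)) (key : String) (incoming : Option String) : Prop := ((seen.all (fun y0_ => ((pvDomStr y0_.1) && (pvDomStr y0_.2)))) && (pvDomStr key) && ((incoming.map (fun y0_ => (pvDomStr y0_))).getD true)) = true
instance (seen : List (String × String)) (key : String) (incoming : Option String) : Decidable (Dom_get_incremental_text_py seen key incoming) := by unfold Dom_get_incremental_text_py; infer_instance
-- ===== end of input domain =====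

-- B replaces A's descending endswith-scan by a single left-to-right pass over `previous`
-- maintaining the set of active match lengths (alternative algorithm; return value only —
-- both Pythons perform the same seen[key] mutation, which is not modeled here).


-- ===== PORT A =====
-- 'for size in range(max_overlap, 0, -1): if previous.endswith(incoming[:size]): overlap = size; break'
-- (overlap stays 0 when no size matches)
def pvAOverlapLoop (previous inc : String) : List Int → Int
  | [] => 0
  | size :: rest =>
    if PySem.Str.endswith previous (PySem.Str.slice inc none (some size)) then size
    else pvAOverlapLoop previous inc rest

def get_incremental_text_py (seen : List (String × String)) (key : String) (incoming : Option String) : String :=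
  match incoming with
  | none => ""            -- 'if not incoming' (None or empty string)
  | some inc =>
    if inc = "" then ""
    else
      let previous := PySem.Dict.getD (PySem.Dict.mk seen) key ""
      if previous = "" then inc
      else if PySem.Str.startswith inc previous then
        PySem.Str.slice inc (some (PySem.Str.len previous)) none
      else
        let maxOverlap := min (PySem.Str.len previous) (PySem.Str.len inc)
        let overlap := pvAOverlapLoop previous inc (PySem.List.pyRange maxOverlap 0 (-1))
        PySem.Str.slice inc (some overlap) none

-- ===== PORT B =====
-- one step per character of `previous`, advancing the list of active match lengths;
-- indices j are Nats (Python ints that are always ≥ 0 here); `inc[j]?` under the guard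
-- 'j < len(incoming)' is exactly Python's incoming[j], and incoming ≠ "" when inc[0]? is read.
def pvBScan (inc : List Char) : List Char → List Nat → List Nat
  | [], active => active
  | ch :: rest, active =>
    let nxt := (active.filter fun j => decide (j < inc.length) && (inc[j]? == some ch)).map (· + 1)
    let nxt' := if inc[0]? == some ch then nxt ++ [1] else nxt
    pvBScan inc rest nxt'

def get_incremental_text_py_alt (seen : List (String × String)) (key : String) (incoming : Option String) : String :=
  match incoming with
  | none => ""            -- 'if not incoming'
  | some inc =>
    if inc = "" then ""
    else
      let previous := PySem.Dict.getD (PySem.Dict.mk seen) key ""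
      let active := pvBScan inc.toList previous.toList []
      let overlap := PySem.List.maxD active (fun j => j) 0    -- max(active, default=0)
      PySem.Str.slice inc (some (overlap : Int)) none

-- ===== PRECONDITION & SPEC =====
def Spec_get_incremental_text_py (seen : List (String × String)) (key : String) (incoming : Option String) (out : String) : Prop := out = get_incremental_text_py_alt seen key incoming
instance (seen : List (String × String)) (key : String) (incoming : Option String) (out : String) : Decidable (Spec_get_incremental_text_py seen key incoming out) := by unfold Spec_get_incremental_text_py; infer_instance

-- ===== CLAIM (what is proved, stated in full; the proofs are below) =====
def Claim_equal_get_incremental_text_py : Prop := ∀ (seen : List (String × String)) (key : String) (incoming : Option String), Dom_get_incremental_text_py seen key incoming → Spec_get_incremental_text_py seen key incoming (get_incremental_text_py seen key incoming)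

-- ===== LEMMAS AND PROOFS =====

-- the common value: the largest k ≤ min(|p|,|i|) with take k i a suffix of p
def pvOv (p i : List Char) : Nat :=
  Nat.findGreatest (fun k => i.take k <:+ p) (min p.length i.length)

-- suffix-extension: appending one char to the text extends a match by exactly one position
theorem pvTakeSuffixConcat (i pr : List Char) (c : Char) (j : Nat) (h1 : 1 ≤ j) (h2 : j ≤ i.length) :
    (i.take j <:+ pr ++ [c]) ↔ (i[j-1]? = some c ∧ i.take (j-1) <:+ pr) := by
  have hlt : j - 1 < i.length := by omega
  have hget : i[j-1]? = some (i[j-1]'hlt) := List.getElem?_eq_getElem hlt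
  have htake : i.take j = i.take (j-1) ++ [i[j-1]'hlt] := by
    have := List.take_add_one (l := i) (i := j - 1)
    rw [hget] at this
    simp only [Option.toList_some, Nat.sub_add_cancel h1] at this
    exact this
  constructor
  · intro h
    rcases List.suffix_concat_iff.mp h with h0 | ⟨t, ht, hts⟩
    · exfalso
      have : (i.take j).length = j := by simp [Nat.min_eq_left h2]
      rw [h0] at this; simp at this; omega
    · rw [htake] at ht
      have := List.append_inj' ht rfl
      rcases this with ⟨ht1, ht2⟩
      simp at ht2
      refine ⟨by rw [hget, ht2], by rw [ht1]; exact hts⟩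
  · rintro ⟨hc, hs⟩
    rw [hget] at hc
    injection hc with hc
    rw [htake, hc]
    exact List.suffix_concat_iff.mpr (Or.inr ⟨i.take (j-1), rfl, hs⟩)

-- B's scan invariant: active is exactly the set of live match lengths
theorem pvBScanMem (i : List Char) (ts : List Char) : ∀ (pr : List Char) (ac : List Nat),
    (∀ j, j ∈ ac ↔ 1 ≤ j ∧ j ≤ i.length ∧ i.take j <:+ pr) →
    ∀ j, j ∈ pvBScan i ts ac ↔ 1 ≤ j ∧ j ≤ i.length ∧ i.take j <:+ pr ++ ts := by
  induction ts with
  | nil => intro pr ac h j; simpa using h j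
  | cons ch rest ih =>
    intro pr ac h j
    have hstep : ∀ j', j' ∈ (if i[0]? == some ch then
          ((ac.filter fun j => decide (j < i.length) && (i[j]? == some ch)).map (· + 1)) ++ [1]
        else ((ac.filter fun j => decide (j < i.length) && (i[j]? == some ch)).map (· + 1))) ↔
        1 ≤ j' ∧ j' ≤ i.length ∧ i.take j' <:+ pr ++ [ch] := by
      intro j'
      match j' with
      | 0 =>
        constructor
        · intro hm
          split at hm <;> simp [List.mem_filter] at hm
        · rintro ⟨h1, -⟩; omega
      | 1 =>
        have hr : (1 ≤ 1 ∧ 1 ≤ i.length ∧ i.take 1 <:+ pr ++ [ch]) ↔ i[0]? = some ch := by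
          constructor
          · rintro ⟨-, hle, hs⟩
            have := (pvTakeSuffixConcat i pr ch 1 le_rfl hle).mp hs
            exact this.1
          · intro h0
            have hlen : 1 ≤ i.length := by
              cases i with
              | nil => simp at h0
              | cons a t => simp
            exact ⟨le_rfl, hlen, (pvTakeSuffixConcat i pr ch 1 le_rfl hlen).mpr ⟨h0, by simp⟩⟩
        rw [hr]
        split
        · rename_i hc
          constructor
          · intro _; simpa using hc
          · intro _; simp
        · rename_i hc
          simp only [List.mem_map, List.mem_filter]
          constructor
          · rintro ⟨j0, ⟨hj0, hq⟩, hj01⟩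
            have : j0 = 0 := by omega
            subst this
            have := (h 0).mp hj0
            omega
          · intro h0; exact absurd (by simpa using h0) (by simpa using hc)
      | (j'' + 2) =>
        have key : (j'' + 2 ≤ i.length ∧ i.take (j''+2) <:+ pr ++ [ch]) ↔
            (j'' + 1 ∈ ac ∧ j'' + 1 < i.length ∧ i[j''+1]? = some ch) := by
          constructor
          · rintro ⟨hle, hs⟩
            have := (pvTakeSuffixConcat i pr ch (j''+2) (by omega) hle).mp hs
            have hidx : j'' + 2 - 1 = j'' + 1 := by omega
            rw [hidx] at this
            exact ⟨(h (j''+1)).mpr ⟨by omega, by omega, this.2⟩, by omega, this.1⟩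
          · rintro ⟨hmem, hlt, hc⟩
            have hm := (h (j''+1)).mp hmem
            refine ⟨by omega, (pvTakeSuffixConcat i pr ch (j''+2) (by omega) (by omega)).mpr ?_⟩
            have hidx : j'' + 2 - 1 = j'' + 1 := by omega
            rw [hidx]
            exact ⟨hc, hm.2.2⟩
        have hmm : (j'' + 2) ∈ ((ac.filter fun j => decide (j < i.length) && (i[j]? == some ch)).map (· + 1)) ↔
            (j'' + 1 ∈ ac ∧ j'' + 1 < i.length ∧ i[j''+1]? = some ch) := by
          simp only [List.mem_map, List.mem_filter, Bool.and_eq_true, decide_eq_true_eq, beq_iff_eq]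
          constructor
          · rintro ⟨j0, ⟨hj0, hlt, hc⟩, hj01⟩
            have : j0 = j'' + 1 := by omega
            subst this; exact ⟨hj0, hlt, hc⟩
          · rintro ⟨hj0, hlt, hc⟩
            exact ⟨j'' + 1, ⟨hj0, hlt, hc⟩, rfl⟩
        constructor
        · intro hm
          have : (j'' + 2) ∈ ((ac.filter fun j => decide (j < i.length) && (i[j]? == some ch)).map (· + 1)) := by
            split at hm
            · rcases List.mem_append.mp hm with h' | h'
              · exact h'
              · exact absurd (List.mem_singleton.mp h') (by omega)
            · exact hm
          have := key.mpr (hmm.mp this)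
          exact ⟨by omega, this⟩
        · rintro ⟨-, hle, hs⟩
          have := hmm.mpr (key.mp ⟨hle, hs⟩)
          split
          · exact List.mem_append.mpr (Or.inl this)
          · exact this
    have := ih (pr ++ [ch]) _ hstep j
    simpa [pvBScan] using this

-- A's descending scan computes Nat.findGreatest
theorem pvALoopEq (previous inc : String) (n : Nat) :
    pvAOverlapLoop previous inc (PySem.List.pyRange (n : Int) 0 (-1)) =
      ((Nat.findGreatest (fun k => inc.toList.take k <:+ previous.toList) n : Nat) : Int) := by
  induction n with
  | zero =>
    have h00 : ((0 : Nat) : Int) ≤ 0 := by norm_num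
    rw [PySem.List.pyRange_neg_one_eq_nil h00]; simp [pvAOverlapLoop]
  | succ m ih =>
    rw [PySem.List.pyRange_neg_one_cons (by exact_mod_cast Nat.succ_pos m)]
    have hsub : ((m + 1 : Nat) : Int) - 1 = (m : Int) := by push_cast; ring
    rw [hsub]
    have hcond : PySem.Str.endswith previous (PySem.Str.slice inc none (some ((m + 1 : Nat) : Int))) = true ↔
        inc.toList.take (m + 1) <:+ previous.toList := by
      rw [PySem.Str.endswith_eq, PySem.Chars.endswith_iff, PySem.Str.toList_slice,
        PySem.Chars.slice_eq_listSlice, PySem.List.slice_to_natCast]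
    by_cases h : inc.toList.take (m + 1) <:+ previous.toList
    · simp only [pvAOverlapLoop, hcond.mpr h, Nat.findGreatest_succ, h, if_pos]
    · have hc : PySem.Str.endswith previous (PySem.Str.slice inc none (some ((m + 1 : Nat) : Int))) = false := by
        rw [Bool.eq_false_iff]; intro hh; exact h (hcond.mp hh)
      simp only [pvAOverlapLoop, hc, Bool.false_eq_true, Nat.findGreatest_succ, h, if_neg,
        not_false_iff, ih]

-- a matching length is bounded by |p|
theorem pvOvMemBound (p i : List Char) (j : Nat) (hle : j ≤ i.length) (hs : i.take j <:+ p) :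
    j ≤ p.length := by
  have := hs.length_le
  simpa [Nat.min_eq_left hle] using this

-- A's value, in closed form
theorem pvAval (seen : List (String × String)) (key : String) (inc : String) (hne : ¬ inc = "") :
    get_incremental_text_py seen key (some inc) =
      PySem.Str.slice inc (some ((pvOv (PySem.Dict.getD (PySem.Dict.mk seen) key "").toList inc.toList : Nat) : Int)) none := by
  simp only [get_incremental_text_py, hne, if_false]
  set previous := PySem.Dict.getD (PySem.Dict.mk seen) key "" with hprev
  by_cases hp : previous = ""
  · have h0 : pvOv previous.toList inc.toList = 0 := by
      simp [pvOv, hp]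
    rw [if_pos hp, h0]
    apply String.toList_inj.mp
    simp [PySem.Str.toList_slice, PySem.Chars.slice_eq_listSlice]
  · rw [if_neg hp]
    by_cases hsw : PySem.Str.startswith inc previous = true
    · rw [if_pos hsw]
      have hpre : previous.toList <+: inc.toList := by
        rw [PySem.Str.startswith_eq, PySem.Chars.startswith_iff] at hsw
        exact hsw
      have hlen : previous.toList.length ≤ inc.toList.length := hpre.length_le
      have htake : inc.toList.take previous.toList.length = previous.toList :=
        (List.prefix_iff_eq_take.mp hpre).symm
      have hmin : min previous.toList.length inc.toList.length = previous.toList.length :=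
        Nat.min_eq_left hlen
      have hov : pvOv previous.toList inc.toList = previous.toList.length := by
        unfold pvOv
        rw [hmin]
        refine le_antisymm (Nat.findGreatest_le _) (Nat.le_findGreatest le_rfl ?_)
        rw [htake]
      rw [hov, PySem.Str.len_eq]
    · rw [if_neg hsw]
      have hmin : min (PySem.Str.len previous) (PySem.Str.len inc) =
          ((min previous.toList.length inc.toList.length : Nat) : Int) := by
        rw [PySem.Str.len_eq, PySem.Str.len_eq]; push_cast; rfl
      rw [hmin, pvALoopEq]
      rfl

-- maxD over the active list is the greatest live length
theorem pvBval (seen : List (String × String)) (key : String) (inc : String) (hne : ¬ inc = "") :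
    get_incremental_text_py_alt seen key (some inc) =
      PySem.Str.slice inc (some ((pvOv (PySem.Dict.getD (PySem.Dict.mk seen) key "").toList inc.toList : Nat) : Int)) none := by
  simp only [get_incremental_text_py_alt, hne, if_false]
  set previous := PySem.Dict.getD (PySem.Dict.mk seen) key "" with hprev
  set p := previous.toList
  set i := inc.toList
  have hmem : ∀ j, j ∈ pvBScan i p [] ↔ 1 ≤ j ∧ j ≤ i.length ∧ i.take j <:+ p := by
    have h0 : ∀ j, j ∈ ([] : List Nat) ↔ 1 ≤ j ∧ j ≤ i.length ∧ i.take j <:+ ([] : List Char) := by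
      intro j
      simp only [List.mem_nil_iff, false_iff]
      rintro ⟨h1, h2, hs⟩
      have := List.suffix_nil.mp hs
      have hl : (i.take j).length = j := by simp [Nat.min_eq_left h2]
      rw [this] at hl; simp at hl; omega
    have := pvBScanMem i p [] [] h0
    simpa using this
  have hov : PySem.List.maxD (pvBScan i p []) (fun j => j) 0 = pvOv p i := by
    cases hA : pvBScan i p [] with
    | nil =>
      have hz : pvOv p i = 0 := by
        unfold pvOv
        rw [Nat.findGreatest_eq_zero_iff]
        intro k hk hkle hP
        have : k ∈ pvBScan i p [] := (hmem k).mpr ⟨hk, le_trans hkle (Nat.min_le_right _ _), hP⟩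
        rw [hA] at this; simp at this
      rw [hz]; rfl
    | cons a t =>
      have hmax : PySem.List.max? (a :: t) (fun j => j) = some (t.foldl max a) :=
        PySem.List.max?_id_cons a t
      set m := t.foldl max a with hm
      have hmemm : m ∈ pvBScan i p [] := by rw [hA]; exact PySem.List.max?_mem hmax
      have hmc := (hmem m).mp hmemm
      have hmp : m ≤ p.length := pvOvMemBound p i m hmc.2.1 hmc.2.2
      have hle1 : m ≤ pvOv p i :=
        Nat.le_findGreatest (by omega) hmc.2.2
      have hle2 : pvOv p i ≤ m := by
        rcases Nat.eq_zero_or_pos (pvOv p i) with hz | hpos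
        · omega
        · have hP : i.take (pvOv p i) <:+ p := by
            simpa [pvOv] using Nat.findGreatest_spec (P := fun k => i.take k <:+ p)
              (n := min p.length i.length) (Nat.zero_le _) (by simp)
          have hb : pvOv p i ≤ min p.length i.length := Nat.findGreatest_le _
          have : pvOv p i ∈ pvBScan i p [] :=
            (hmem _).mpr ⟨hpos, le_trans hb (Nat.min_le_right _ _), hP⟩
          rw [hA] at this
          have := PySem.List.max?_isMax (key := fun j => j) hmax _ this
          simpa using this
      have : PySem.List.maxD (a :: t) (fun j => j) 0 = m := by
        unfold PySem.List.maxD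
        rw [hmax]; rfl
      rw [this]; omega
  rw [hov]

-- ===== VERDICT (by name: the statement is the Claim_ definition above) =====
theorem get_incremental_text_py_spec : Claim_equal_get_incremental_text_py := by
  intro seen key incoming _
  unfold Spec_get_incremental_text_py
  match incoming with
  | none => rfl
  | some inc =>
    by_cases hne : inc = ""
    · subst hne; rfl
    · rw [pvAval seen key inc hne, pvBval seen key inc hne]
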